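-- pv_equiv track=rewrite | github.com/src-lua/ChronoLattice | prev/automacao_38.py | make_hist_signature
-- ===== SOURCE A (Python) =====
-- from collections import deque, defaultdict, OrderedDict
-- from typing import Any, List, Tuple, Dict, Optional, Set, Callable
--
-- def make_hist_signature(
--     finish_times: Dict[str, int],
--     durations: Dict[str, int],
--     resources: Dict[str, Tuple[str, int]],
--     tasks_in_scope: List[str]
-- ) -> Tuple[Tuple[str, Tuple[Tuple[int, int], ...]], ...]:
--     """
--     Assinatura de histograma por varredura de eventos (sem vetor diário).
--     Preserva exatamente o mesmo RLE que seria obtido a partir da linha do tempo densa.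
--     """
--     if not tasks_in_scope:
--         return tuple()
--
--     project_duration = 0
--     for tid in tasks_in_scope:
--         if tid in finish_times:
--             project_duration = max(project_duration, finish_times[tid])
--     if project_duration <= 0:
--         return tuple()
--
--     events_by_res: Dict[str, Dict[int, int]] = defaultdict(lambda: defaultdict(int))
--     for tid in tasks_in_scope:
--         if tid in finish_times and tid in durations and tid in resources:
--             res_id, _ = resources[tid]
--             if not res_id:
--                 continue
--             ft = finish_times[tid]
--             st = max(0, ft - durations[tid])
--             events_by_res[res_id][st] += 1
--             events_by_res[res_id][ft] -= 1
--
--     signature_items = []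
--     for res_id in sorted(events_by_res.keys()):
--         events = events_by_res[res_id]
--         # sentinela para fechar o último segmento
--         if project_duration not in events:
--             events[project_duration] += 0
--         cur = 0
--         last_t = 0
--         runs: List[Tuple[int, int]] = []
--         for t in sorted(events.keys()):
--             seg_len = t - last_t
--             if seg_len > 0:
--                 # adiciona o trecho constante [last_t, t) com valor 'cur'
--                 if runs and runs[-1][0] == cur:
--                     runs[-1] = (cur, runs[-1][1] + seg_len)
--                 else:
--                     runs.append((cur, seg_len))
--             cur += events[t]
--             last_t = t
--         signature_items.append((res_id, tuple(runs)))
--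
--     return tuple(signature_items)
-- ===== SOURCE B (Python) =====
-- def make_hist_signature(finish_times, durations, resources, tasks_in_scope):
--     """Sorted distinct time boundaries per resource; the active count on each
--     segment is obtained by directly counting the covering intervals (no delta
--     dict, no running accumulator), and a separate pass run-length-compresses
--     the segment list."""
--     if not tasks_in_scope:
--         return tuple()
--
--     project_duration = max([0] + [finish_times[tid] for tid in tasks_in_scope
--                                   if tid in finish_times])
--     if project_duration <= 0:
--         return tuple()
--
--     by_res = {}
--     for tid in tasks_in_scope:
--         if tid in finish_times and tid in durations and tid in resources:
--             res_id = resources[tid][0]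
--             if res_id:
--                 ft = finish_times[tid]
--                 by_res.setdefault(res_id, []).append((max(0, ft - durations[tid]), ft))
--
--     out = []
--     for res_id in sorted(by_res):
--         ivs = by_res[res_id]
--         pts = sorted({project_duration} | {t for iv in ivs for t in iv})
--         if pts[0] > 0:
--             pts = [0] + pts
--         segments = [(sum(1 for st, _ in ivs if st <= u)
--                      - sum(1 for _, ft in ivs if ft <= u),
--                      v - u)
--                     for u, v in zip(pts, pts[1:])]
--         runs = []
--         i = 0
--         n = len(segments)
--         while i < n:
--             val, total = segments[i]
--             j = i + 1
--             while j < n and segments[j][0] == val: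
--                 total += segments[j][1]
--                 j += 1
--             runs.append((val, total))
--             i = j
--         out.append((res_id, tuple(runs)))
--     return tuple(out)
-- ===== Notes on version B (the rewrite author's own statement) =====
-- stated objective: alternative
-- what changed: B drops A's per-resource delta dict and running-sum event sweep entirely: it collects each resource's (start,finish) intervals, takes the sorted distinct time boundaries, computes the value of each segment by directly counting the intervals that cover it (two comparison counts), and run-length-compresses the segment list in a separate index-walking pass.
import Mathlib
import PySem

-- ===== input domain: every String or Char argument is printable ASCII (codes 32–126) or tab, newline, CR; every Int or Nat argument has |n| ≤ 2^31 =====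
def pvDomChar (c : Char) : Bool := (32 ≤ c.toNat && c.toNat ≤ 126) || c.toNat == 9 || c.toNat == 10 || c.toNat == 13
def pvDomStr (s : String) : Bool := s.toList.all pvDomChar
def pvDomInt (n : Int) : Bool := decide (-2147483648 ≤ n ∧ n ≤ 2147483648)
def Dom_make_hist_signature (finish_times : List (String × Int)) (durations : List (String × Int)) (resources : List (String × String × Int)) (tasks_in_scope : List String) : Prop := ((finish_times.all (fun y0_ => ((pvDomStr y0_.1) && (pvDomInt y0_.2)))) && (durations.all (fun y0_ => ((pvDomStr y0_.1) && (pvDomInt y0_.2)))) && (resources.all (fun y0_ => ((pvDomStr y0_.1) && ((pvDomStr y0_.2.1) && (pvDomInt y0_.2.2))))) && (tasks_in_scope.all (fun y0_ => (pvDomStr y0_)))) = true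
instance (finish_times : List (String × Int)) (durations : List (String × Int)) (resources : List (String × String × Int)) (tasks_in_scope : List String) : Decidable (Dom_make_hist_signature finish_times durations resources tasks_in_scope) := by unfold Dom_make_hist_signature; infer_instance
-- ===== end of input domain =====

-- B replaces A's per-resource delta dict + running-sum event sweep by direct per-segment
-- counting over the sorted distinct boundaries plus a separate run-length-compression pass
-- (objective: alternative algorithm, same results).

-- ===== PORT A =====
-- A-side helper: one step of A's event-sweep RLE loop (for t in sorted(events.keys()): …)
def histRunStepA (events : PySem.Dict Int Int) (s : List (Int × Int) × Int × Int) (t : Int) :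
    List (Int × Int) × Int × Int :=
  let seg := t - s.2.2
  let runs :=
    if seg > 0 then
      match s.1.getLast? with
      | some last =>
          if last.1 = s.2.1 then s.1.dropLast ++ [(s.2.1, last.2 + seg)]
          else s.1 ++ [(s.2.1, seg)]
      | none => s.1 ++ [(s.2.1, seg)]
    else s.1
  (runs, s.2.1 + events.getD t 0, t)

-- A-side helper: one step of the pass that fills events_by_res (nested defaultdict)
def histBuildStepA (ftD duD : PySem.Dict String Int) (rsD : PySem.Dict String (String × Int))
    (d : PySem.Dict String (PySem.Dict Int Int)) (tid : String) :
    PySem.Dict String (PySem.Dict Int Int) :=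
  if ftD.contains tid && duD.contains tid && rsD.contains tid then
    let rid := (rsD.getD tid ("", 0)).1
    if rid = "" then d
    else
      let ft := ftD.getD tid 0
      let st := max 0 (ft - duD.getD tid 0)
      let inner := d.getD rid PySem.Dict.empty
      let inner := inner.modify st 0 (· + 1)
      let inner := inner.modify ft 0 (· - 1)
      d.insert rid inner
  else d

def make_hist_signature (finish_times : List (String × Int)) (durations : List (String × Int)) (resources : List (String × String × Int)) (tasks_in_scope : List String) : List (String × (List (Int × Int))) :=
  if tasks_in_scope = [] then []
  else
    let ftD : PySem.Dict String Int := PySem.Dict.ofList finish_times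
    let duD : PySem.Dict String Int := PySem.Dict.ofList durations
    let rsD : PySem.Dict String (String × Int) := PySem.Dict.ofList resources
    let pd : Int := tasks_in_scope.foldl
      (fun acc tid => if ftD.contains tid then max acc (ftD.getD tid 0) else acc) 0
    if pd ≤ 0 then []
    else
      let ebr := tasks_in_scope.foldl (histBuildStepA ftD duD rsD) PySem.Dict.empty
      (PySem.List.sorted ebr.keys (fun x => x)).foldl (fun acc rid =>
        let events := ebr.getD rid PySem.Dict.empty
        -- sentinela: if project_duration not in events: events[project_duration] += 0
        let events := if events.contains pd then events else events.modify pd 0 (· + 0)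
        let fin := (PySem.List.sorted events.keys (fun x => x)).foldl (histRunStepA events) ([], 0, 0)
        acc ++ [(rid, fin.1)]) []

-- ===== PORT B =====
-- B-side helper: the endpoints listed by B's set comprehension {t for iv in ivs for t in iv}
def histEps (ivs : List (Int × Int)) : List Int := ivs.flatMap (fun p => [p.1, p.2])

-- B-side helper: the two comparison counts giving the active count at boundary u
def histCov (ivs : List (Int × Int)) (u : Int) : Int :=
  ((ivs.countP (fun p => decide (p.1 ≤ u)) : Int)) - ((ivs.countP (fun p => decide (p.2 ≤ u)) : Int))

-- B-side helper: the index-walking run-length-compression loop (while i < n: …)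
def histCompress : List (Int × Int) → List (Int × Int)
  | [] => []
  | (v, l) :: rest =>
      (v, l + ((rest.takeWhile (fun p => p.1 == v)).map (fun p => p.2)).sum) ::
        histCompress (rest.dropWhile (fun p => p.1 == v))
  termination_by segs => segs.length
  decreasing_by
    simp only [List.length_cons]
    have := List.length_dropWhile_le (fun p => p.1 == v) rest
    omega

-- B-side helper: one step of the pass grouping intervals per resource (setdefault+append)
def histGroupStepB (ftD duD : PySem.Dict String Int) (rsD : PySem.Dict String (String × Int))
    (d : PySem.Dict String (List (Int × Int))) (tid : String) :
    PySem.Dict String (List (Int × Int)) :=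
  if ftD.contains tid && duD.contains tid && rsD.contains tid then
    let rid := (rsD.getD tid ("", 0)).1
    if rid = "" then d
    else
      let ft := ftD.getD tid 0
      d.modify rid [] (· ++ [(max 0 (ft - duD.getD tid 0), ft)])
  else d

def make_hist_signature_alt (finish_times : List (String × Int)) (durations : List (String × Int)) (resources : List (String × String × Int)) (tasks_in_scope : List String) : List (String × (List (Int × Int))) :=
  if tasks_in_scope = [] then []
  else
    let ftD : PySem.Dict String Int := PySem.Dict.ofList finish_times
    let duD : PySem.Dict String Int := PySem.Dict.ofList durations
    let rsD : PySem.Dict String (String × Int) := PySem.Dict.ofList resources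
    -- max([0] + fts)
    let pd : Int := ((tasks_in_scope.filter (fun tid => ftD.contains tid)).map
      (fun tid => ftD.getD tid 0)).foldl max 0
    if pd ≤ 0 then []
    else
      let byRes := tasks_in_scope.foldl (histGroupStepB ftD duD rsD) PySem.Dict.empty
      (PySem.List.sorted byRes.keys (fun x => x)).foldl (fun acc rid =>
        let ivs := byRes.getD rid []
        -- pts = sorted({pd} | {endpoints}); if pts[0] > 0: pts = [0] + pts
        let pts := PySem.List.sorted (PySem.Set.ofList (pd :: histEps ivs)) (fun x => x)
        let pts := if pts.headD 0 > 0 then 0 :: pts else pts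
        let segments := (pts.zip pts.tail).map (fun uv => (histCov ivs uv.1, uv.2 - uv.1))
        acc ++ [(rid, histCompress segments)]) []

-- ===== PRECONDITION & SPEC =====
def Spec_make_hist_signature (finish_times : List (String × Int)) (durations : List (String × Int)) (resources : List (String × String × Int)) (tasks_in_scope : List String) (out : List (String × (List (Int × Int)))) : Prop := out = make_hist_signature_alt finish_times durations resources tasks_in_scope
instance (finish_times : List (String × Int)) (durations : List (String × Int)) (resources : List (String × String × Int)) (tasks_in_scope : List String) (out : List (String × (List (Int × Int)))) : Decidable (Spec_make_hist_signature finish_times durations resources tasks_in_scope out) := by unfold Spec_make_hist_signature; infer_instance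

-- ===== CLAIM (what is proved, stated in full; the proofs are below) =====
def Claim_equal_make_hist_signature : Prop := ∀ (finish_times : List (String × Int)) (durations : List (String × Int)) (resources : List (String × String × Int)) (tasks_in_scope : List String), Dom_make_hist_signature finish_times durations resources tasks_in_scope → Spec_make_hist_signature finish_times durations resources tasks_in_scope (make_hist_signature finish_times durations resources tasks_in_scope)

-- ===== LEMMAS AND PROOFS =====

-- proof-only helpers characterising A's data
def mergeStep (runs : List (Int × Int)) (vl : Int × Int) : List (Int × Int) :=
  match runs.getLast? with
  | some last => if last.1 = vl.1 then runs.dropLast ++ [(vl.1, last.2 + vl.2)] else runs ++ [vl]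
  | none => runs ++ [vl]

def deltaDict (ivs : List (Int × Int)) : PySem.Dict Int Int :=
  ivs.foldl (fun e p => (e.modify p.1 0 (· + 1)).modify p.2 0 (· - 1)) PySem.Dict.empty

def sentinelOf (ivs : List (Int × Int)) (pd : Int) : PySem.Dict Int Int :=
  if (deltaDict ivs).contains pd then deltaDict ivs else (deltaDict ivs).modify pd 0 (· + 0)

def dOf (ivs : List (Int × Int)) (t : Int) : Int :=
  ((ivs.countP (fun p => decide (p.1 = t)) : Int)) - ((ivs.countP (fun p => decide (p.2 = t)) : Int))

def segsOf (ivs : List (Int × Int)) : Int → List Int → List (Int × Int)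
  | _, [] => []
  | last, t :: ks => (histCov ivs last, t - last) :: segsOf ivs t ks

theorem mem_histEps (ivs : List (Int × Int)) (e : Int) :
    e ∈ histEps ivs ↔ ∃ p ∈ ivs, e = p.1 ∨ e = p.2 := by
  simp only [histEps, List.mem_flatMap, List.mem_cons, List.not_mem_nil, or_false]

theorem deltaDict_flat (ivs : List (Int × Int)) (e : PySem.Dict Int Int) :
    ivs.foldl (fun e p => (e.modify p.1 0 (· + 1)).modify p.2 0 (· - 1)) e
      = (ivs.flatMap (fun p => [(p.1, (1 : Int)), (p.2, (-1 : Int))])).foldl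
          (fun d q => d.modify q.1 0 (· + q.2)) e := by
  induction ivs generalizing e with
  | nil => rfl
  | cons p ivs ih =>
    have hfun : (fun x : Int => x - 1) = (fun x : Int => x + (-1)) :=
      funext fun x => sub_eq_add_neg x 1
    simp only [List.foldl_cons, List.flatMap_cons, List.foldl_append, List.foldl_nil]
    rw [hfun]
    exact ih _

theorem deltaDict_keys (ivs : List (Int × Int)) :
    (deltaDict ivs).keys = PySem.Set.ofList (histEps ivs) := by
  unfold deltaDict
  rw [deltaDict_flat]
  have h := PySem.Dict.keys_foldl_modify_key
    (ivs.flatMap (fun p => [(p.1, (1 : Int)), (p.2, (-1 : Int))]))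
    (fun q : Int × Int => q.1) (0 : Int) (fun _ q => (· + q.2)) PySem.Dict.empty
  rw [h]
  simp [PySem.Set.update_nil_left, List.map_flatMap, histEps]

theorem deltaDict_getD_aux (ivs : List (Int × Int)) (e : PySem.Dict Int Int) (t : Int) :
    (ivs.foldl (fun e p => (e.modify p.1 0 (· + 1)).modify p.2 0 (· - 1)) e).getD t 0
      = e.getD t 0 + dOf ivs t := by
  induction ivs generalizing e with
  | nil => simp [dOf]
  | cons p ivs ih =>
    simp only [List.foldl_cons]
    rw [ih]
    simp only [PySem.Dict.getD_modify]
    unfold dOf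
    simp only [List.countP_cons, decide_eq_true_eq]
    split_ifs <;> subst_vars <;> (try simp_all) <;> push_cast <;> omega

theorem deltaDict_getD (ivs : List (Int × Int)) (t : Int) :
    (deltaDict ivs).getD t 0 = dOf ivs t := by
  unfold deltaDict
  rw [deltaDict_getD_aux]
  simp [PySem.Dict.getD_empty]

theorem sentinel_getD (ivs : List (Int × Int)) (pd t : Int) :
    (sentinelOf ivs pd).getD t 0 = dOf ivs t := by
  unfold sentinelOf
  split
  · exact deltaDict_getD ivs t
  · rw [PySem.Dict.getD_modify]
    split
    · next h => rw [deltaDict_getD, h]; ring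
    · exact deltaDict_getD ivs t

theorem sentinel_keys (ivs : List (Int × Int)) (pd : Int) :
    (sentinelOf ivs pd).keys = PySem.Set.ofList (histEps ivs ++ [pd]) := by
  have hofl : PySem.Set.ofList (histEps ivs ++ [pd])
      = PySem.Set.add (PySem.Set.ofList (histEps ivs)) pd := by
    simp [PySem.Set.ofList_eq_foldl, List.foldl_append]
  unfold sentinelOf
  by_cases hc : (deltaDict ivs).contains pd = true
  · have hmem : pd ∈ PySem.Set.ofList (histEps ivs) := by
      have h := PySem.Dict.contains_eq_decide_mem_keys (deltaDict ivs) pd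
      rw [hc, deltaDict_keys] at h
      exact of_decide_eq_true h.symm
    rw [if_pos hc, deltaDict_keys, hofl, PySem.Set.add]
    simp [hmem]
  · have hc' : (deltaDict ivs).contains pd = false := by
      simpa using hc
    have hmem : pd ∉ PySem.Set.ofList (histEps ivs) := by
      have h := PySem.Dict.contains_eq_decide_mem_keys (deltaDict ivs) pd
      rw [hc', deltaDict_keys] at h
      intro hm
      simp [hm] at h
    rw [if_neg hc, PySem.Dict.keys_modify,
      PySem.Dict.keys_insert_of_not_contains _ _ hc', deltaDict_keys, hofl, PySem.Set.add]
    simp [hmem]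

theorem sorted_keys_eq_pts (ivs : List (Int × Int)) (pd : Int) :
    PySem.List.sorted (sentinelOf ivs pd).keys (fun x => x)
      = PySem.List.sorted (PySem.Set.ofList (pd :: histEps ivs)) (fun x => x) := by
  rw [sentinel_keys, PySem.List.sorted_id_eq_sorted_id_iff_perm,
    List.perm_ext_iff_of_nodup (PySem.Set.nodup_ofList _) (PySem.Set.nodup_ofList _)]
  intro x
  simp [PySem.Set.mem_ofList]
  tauto

theorem cov_min (ivs : List (Int × Int)) (t1 : Int)
    (h : ∀ e ∈ histEps ivs, t1 ≤ e) : histCov ivs t1 = dOf ivs t1 := by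
  have h1 : ivs.countP (fun p => decide (p.1 ≤ t1)) = ivs.countP (fun p => decide (p.1 = t1)) := by
    apply List.countP_congr
    intro p hp
    have := h p.1 ((mem_histEps ivs p.1).mpr ⟨p, hp, Or.inl rfl⟩)
    simp; omega
  have h2 : ivs.countP (fun p => decide (p.2 ≤ t1)) = ivs.countP (fun p => decide (p.2 = t1)) := by
    apply List.countP_congr
    intro p hp
    have := h p.2 ((mem_histEps ivs p.2).mpr ⟨p, hp, Or.inr rfl⟩)
    simp; omega
  simp [histCov, dOf, h1, h2]

theorem cov_pos (ivs : List (Int × Int))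
    (h : ∀ e ∈ histEps ivs, 0 < e) : histCov ivs 0 = 0 := by
  have h1 : ivs.countP (fun p => decide (p.1 ≤ (0:Int))) = 0 := by
    apply List.countP_eq_zero.mpr
    intro p hp
    have := h p.1 ((mem_histEps ivs p.1).mpr ⟨p, hp, Or.inl rfl⟩)
    simp; omega
  have h2 : ivs.countP (fun p => decide (p.2 ≤ (0:Int))) = 0 := by
    apply List.countP_eq_zero.mpr
    intro p hp
    have := h p.2 ((mem_histEps ivs p.2).mpr ⟨p, hp, Or.inr rfl⟩)
    simp; omega
  simp [histCov, h1, h2]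

theorem cnt_step (l : List (Int × Int)) (f : Int × Int → Int) (u t : Int)
    (hut : u < t) (h : ∀ p ∈ l, u < f p → f p ≤ t → f p = t) :
    l.countP (fun p => decide (f p ≤ t))
      = l.countP (fun p => decide (f p ≤ u)) + l.countP (fun p => decide (f p = t)) := by
  induction l with
  | nil => simp
  | cons p l ih =>
    have hp := h p (by simp)
    have ih' := ih (fun q hq => h q (List.mem_cons_of_mem _ hq))
    simp only [List.countP_cons]
    by_cases h1 : f p ≤ u
    · have h2 : f p ≤ t := le_of_lt (lt_of_le_of_lt h1 hut)
      have h3 : ¬ f p = t := by omega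
      rw [if_pos (by simpa using h2), if_pos (by simpa using h1), if_neg (by simpa using h3)]
      omega
    · by_cases h2 : f p ≤ t
      · have h3 : f p = t := hp (by omega) h2
        rw [if_pos (by simpa using h2), if_neg (by simpa using h1), if_pos (by simpa using h3)]
        omega
      · have h3 : ¬ f p = t := by omega
        rw [if_neg (by simpa using h2), if_neg (by simpa using h1), if_neg (by simpa using h3)]
        omega

theorem cov_step (ivs : List (Int × Int)) (u t : Int) (hut : u < t)
    (h : ∀ e ∈ histEps ivs, u < e → e ≤ t → e = t) :
    histCov ivs t = histCov ivs u + dOf ivs t := by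
  have h1 := cnt_step ivs (fun p => p.1) u t hut
    (fun p hp => h p.1 ((mem_histEps ivs p.1).mpr ⟨p, hp, Or.inl rfl⟩))
  have h2 := cnt_step ivs (fun p => p.2) u t hut
    (fun p hp => h p.2 ((mem_histEps ivs p.2).mpr ⟨p, hp, Or.inr rfl⟩))
  simp only [histCov, dOf]
  push_cast [h1, h2]
  ring

theorem runStepA_eq (ev : PySem.Dict Int Int) (ivs : List (Int × Int))
    (runs : List (Int × Int)) (c last t : Int) (h : ev.getD t 0 = dOf ivs t) :
    histRunStepA ev (runs, c, last) t
      = (if t - last > 0 then mergeStep runs (c, t - last) else runs, c + dOf ivs t, t) := by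
  simp only [histRunStepA, mergeStep, h]

theorem merge_compress_aux (segs : List (Int × Int)) (front : List (Int × Int)) (v l : Int) :
    List.foldl mergeStep (front ++ [(v, l)]) segs = front ++ histCompress ((v, l) :: segs) := by
  induction segs generalizing front v l with
  | nil => simp [histCompress]
  | cons wm rest ih =>
    obtain ⟨w, m⟩ := wm
    have hlast : (front ++ [(v, l)]).getLast? = some (v, l) := List.getLast?_concat
    have hdrop : (front ++ [(v, l)]).dropLast = front := List.dropLast_concat
    by_cases hw : w = v
    · subst hw
      have hstep : mergeStep (front ++ [(w, l)]) (w, m) = front ++ [(w, l + m)] := by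
        simp [mergeStep, hlast, hdrop]
      simp only [List.foldl_cons, hstep]
      rw [ih front w (l + m)]
      have hbeq : ((w, m) : Int × Int).1 == w := by simp
      simp [histCompress, List.takeWhile_cons, List.dropWhile_cons, hbeq, add_assoc]
    · have hne : ¬ ((v, l) : Int × Int).1 = ((w, m) : Int × Int).1 := fun h => hw h.symm
      have hstep : mergeStep (front ++ [(v, l)]) (w, m) = (front ++ [(v, l)]) ++ [(w, m)] := by
        simp [mergeStep, hlast, hne]
      simp only [List.foldl_cons, hstep]
      rw [ih (front ++ [(v, l)]) w m]
      have hbeq : (((w, m) : Int × Int).1 == v) = false := by simp [hw]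
      simp [histCompress, List.takeWhile_cons, List.dropWhile_cons, hbeq, List.append_assoc]

theorem merge_compress (segs : List (Int × Int)) :
    List.foldl mergeStep [] segs = histCompress segs := by
  cases segs with
  | nil => simp [histCompress]
  | cons hd rest =>
    obtain ⟨v, l⟩ := hd
    have h0 : mergeStep [] (v, l) = [] ++ [(v, l)] := rfl
    simp only [List.foldl_cons, h0]
    exact merge_compress_aux rest [] v l

theorem main_fold (ivs : List (Int × Int)) (ev : PySem.Dict Int Int)
    (hev : ∀ t, ev.getD t 0 = dOf ivs t) (ks : List Int) (last : Int)
    (runs : List (Int × Int))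
    (hpw : List.Pairwise (· < ·) (last :: ks))
    (hcov : ∀ e ∈ histEps ivs, e ≤ last ∨ e ∈ ks) :
    List.foldl (histRunStepA ev) (runs, histCov ivs last, last) ks
      = (List.foldl mergeStep runs (segsOf ivs last ks),
         histCov ivs (ks.getLastD last), ks.getLastD last) := by
  induction ks generalizing last runs with
  | nil => simp [segsOf]
  | cons t ks ih =>
    have hlt : last < t := (List.pairwise_cons.mp hpw).1 t (by simp)
    have hpw' : List.Pairwise (· < ·) (t :: ks) := (List.pairwise_cons.mp hpw).2
    have hstep := runStepA_eq ev ivs runs (histCov ivs last) last t (hev t)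
    rw [if_pos (by omega : t - last > 0)] at hstep
    have hcd : histCov ivs last + dOf ivs t = histCov ivs t := by
      have hc := cov_step ivs last t hlt (by
        intro e he h1 h2
        rcases hcov e he with h | h
        · omega
        · rcases List.mem_cons.mp h with h | h
          · exact h
          · exact absurd ((List.pairwise_cons.mp hpw').1 e h) (by omega))
      omega
    simp only [List.foldl_cons, hstep, hcd]
    rw [ih t (mergeStep runs (histCov ivs last, t - last)) hpw' (by
      intro e he
      rcases hcov e he with h | h
      · exact Or.inl (le_trans h (le_of_lt hlt))
      · rcases List.mem_cons.mp h with h | h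
        · exact Or.inl (le_of_eq h)
        · exact Or.inr h)]
    simp only [segsOf, List.foldl_cons, List.getLastD_cons]

theorem zip_segs (ivs : List (Int × Int)) (ks : List Int) (last : Int) :
    (((last :: ks).zip ks).map (fun uv => (histCov ivs uv.1, uv.2 - uv.1)))
      = segsOf ivs last ks := by
  induction ks generalizing last with
  | nil => simp [segsOf]
  | cons t ks ih => simp [segsOf, List.zip_cons_cons, ih]

theorem resource_eq (ivs : List (Int × Int)) (pd : Int) :
    ((PySem.List.sorted (sentinelOf ivs pd).keys (fun x => x)).foldl
        (histRunStepA (sentinelOf ivs pd)) ([], 0, 0)).1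
      = (let pts := PySem.List.sorted (PySem.Set.ofList (pd :: histEps ivs)) (fun x => x)
         let pts := if pts.headD 0 > 0 then 0 :: pts else pts
         histCompress ((pts.zip pts.tail).map (fun uv => (histCov ivs uv.1, uv.2 - uv.1)))) := by
  have hpw : List.Pairwise (· < ·)
      (PySem.List.sorted (PySem.Set.ofList (pd :: histEps ivs)) (fun x => x)) :=
    PySem.List.sorted_ofList_pairwise_lt _
  have hmem : ∀ x, x ∈ PySem.List.sorted (PySem.Set.ofList (pd :: histEps ivs)) (fun x => x)
      ↔ x = pd ∨ x ∈ histEps ivs := by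
    intro x
    simp [PySem.List.mem_sorted, PySem.Set.mem_ofList]
  rw [sorted_keys_eq_pts]
  generalize hgen : PySem.List.sorted (PySem.Set.ofList (pd :: histEps ivs)) (fun x => x) = s
  rw [hgen] at hpw hmem
  have hpd : pd ∈ s := (hmem pd).mpr (Or.inl rfl)
  show (List.foldl (histRunStepA (sentinelOf ivs pd)) ([], 0, 0) s).1
      = histCompress (((if s.headD 0 > 0 then 0 :: s else s).zip
          (if s.headD 0 > 0 then 0 :: s else s).tail).map
          (fun uv => (histCov ivs uv.1, uv.2 - uv.1)))
  cases s with
  | nil => simp at hpd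
  | cons t1 rest =>
    simp only [List.headD_cons]
    by_cases ht1 : t1 > 0
    · rw [if_pos ht1]
      simp only [List.tail_cons]
      rw [zip_segs ivs (t1 :: rest) 0]
      have hminpos : ∀ x ∈ (t1 :: rest), (0 : Int) < x := by
        intro x hx
        rcases List.mem_cons.mp hx with h | h
        · omega
        · have := (List.pairwise_cons.mp hpw).1 x h
          omega
      have hc0 : histCov ivs 0 = 0 :=
        cov_pos ivs (fun e he => hminpos e ((hmem e).mpr (Or.inr he)))
      have hm := main_fold ivs (sentinelOf ivs pd) (sentinel_getD ivs pd) (t1 :: rest) 0 []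
        (List.pairwise_cons.mpr ⟨hminpos, hpw⟩)
        (fun e he => Or.inr ((hmem e).mpr (Or.inr he)))
      rw [hc0] at hm
      rw [hm]
      exact merge_compress _
    · rw [if_neg ht1]
      simp only [List.tail_cons]
      rw [zip_segs ivs rest t1]
      have hstep := runStepA_eq (sentinelOf ivs pd) ivs [] 0 0 t1 (sentinel_getD ivs pd t1)
      rw [if_neg (by omega : ¬ t1 - 0 > 0)] at hstep
      have hmin : ∀ e ∈ histEps ivs, t1 ≤ e := by
        intro e he
        rcases List.mem_cons.mp ((hmem e).mpr (Or.inr he)) with h | h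
        · omega
        · have := (List.pairwise_cons.mp hpw).1 e h
          omega
      have hcmin : (0 : Int) + dOf ivs t1 = histCov ivs t1 := by
        rw [cov_min ivs t1 hmin]
        ring
      rw [hcmin] at hstep
      have hm := main_fold ivs (sentinelOf ivs pd) (sentinel_getD ivs pd) rest t1 [] hpw
        (fun e he => by
          rcases List.mem_cons.mp ((hmem e).mpr (Or.inr he)) with h | h
          · exact Or.inl (le_of_eq h)
          · exact Or.inr h)
      simp only [List.foldl_cons, hstep, hm]
      exact merge_compress _

theorem pd_eq (ftD : PySem.Dict String Int) (scope : List String) (a : Int) :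
    scope.foldl (fun acc tid => if ftD.contains tid then max acc (ftD.getD tid 0) else acc) a
      = ((scope.filter (fun tid => ftD.contains tid)).map (fun tid => ftD.getD tid 0)).foldl max a := by
  induction scope generalizing a with
  | nil => rfl
  | cons tid scope ih =>
    by_cases hc : ftD.contains tid = true
    · simp only [List.foldl_cons, List.filter_cons, hc, if_pos, List.map_cons]
      exact ih _
    · simp only [List.foldl_cons, List.filter_cons, hc]
      simp only [Bool.false_eq_true, if_false]
      exact ih _

theorem build_eq (ftD duD : PySem.Dict String Int) (rsD : PySem.Dict String (String × Int))
    (scope : List String) (D : PySem.Dict String (PySem.Dict Int Int))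
    (G : PySem.Dict String (List (Int × Int)))
    (hk : D.keys = G.keys)
    (hv : ∀ r, D.getD r PySem.Dict.empty = deltaDict (G.getD r [])) :
    (scope.foldl (histBuildStepA ftD duD rsD) D).keys
        = (scope.foldl (histGroupStepB ftD duD rsD) G).keys
    ∧ ∀ r, (scope.foldl (histBuildStepA ftD duD rsD) D).getD r PySem.Dict.empty
        = deltaDict ((scope.foldl (histGroupStepB ftD duD rsD) G).getD r []) := by
  induction scope generalizing D G with
  | nil => exact ⟨hk, hv⟩
  | cons tid scope ih =>
    simp only [List.foldl_cons]
    by_cases hg : (ftD.contains tid && duD.contains tid && rsD.contains tid) = true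
    · by_cases hr : (rsD.getD tid ("", 0)).1 = ""
      · have hA : histBuildStepA ftD duD rsD D tid = D := by
          simp [histBuildStepA, hg, hr]
        have hB : histGroupStepB ftD duD rsD G tid = G := by
          simp [histGroupStepB, hg, hr]
        rw [hA, hB]
        exact ih D G hk hv
      · have hA : histBuildStepA ftD duD rsD D tid
            = D.insert (rsD.getD tid ("", 0)).1
                (((D.getD (rsD.getD tid ("", 0)).1 PySem.Dict.empty).modify
                    (max 0 (ftD.getD tid 0 - duD.getD tid 0)) 0 (· + 1)).modify
                  (ftD.getD tid 0) 0 (· - 1)) := by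
          simp [histBuildStepA, hg, hr]
        have hB : histGroupStepB ftD duD rsD G tid
            = G.modify (rsD.getD tid ("", 0)).1 []
                (· ++ [(max 0 (ftD.getD tid 0 - duD.getD tid 0), ftD.getD tid 0)]) := by
          simp [histGroupStepB, hg, hr]
        rw [hA, hB]
        have hcont : D.contains (rsD.getD tid ("", 0)).1 = G.contains (rsD.getD tid ("", 0)).1 := by
          rw [PySem.Dict.contains_eq_decide_mem_keys, PySem.Dict.contains_eq_decide_mem_keys, hk]
        have hkeys : (D.insert (rsD.getD tid ("", 0)).1
              (((D.getD (rsD.getD tid ("", 0)).1 PySem.Dict.empty).modify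
                  (max 0 (ftD.getD tid 0 - duD.getD tid 0)) 0 (· + 1)).modify
                (ftD.getD tid 0) 0 (· - 1))).keys
            = (G.modify (rsD.getD tid ("", 0)).1 []
                (· ++ [(max 0 (ftD.getD tid 0 - duD.getD tid 0), ftD.getD tid 0)])).keys := by
          rw [PySem.Dict.keys_modify]
          by_cases hcr : G.contains (rsD.getD tid ("", 0)).1 = true
          · rw [PySem.Dict.keys_insert_of_contains _ _ (by rw [hcont]; exact hcr),
              PySem.Dict.keys_insert_of_contains _ _ hcr, hk]
          · have hcr' : G.contains (rsD.getD tid ("", 0)).1 = false := by simpa using hcr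
            rw [PySem.Dict.keys_insert_of_not_contains _ _ (by rw [hcont]; exact hcr'),
              PySem.Dict.keys_insert_of_not_contains _ _ hcr', hk]
        have hvals : ∀ r, (D.insert (rsD.getD tid ("", 0)).1
              (((D.getD (rsD.getD tid ("", 0)).1 PySem.Dict.empty).modify
                  (max 0 (ftD.getD tid 0 - duD.getD tid 0)) 0 (· + 1)).modify
                (ftD.getD tid 0) 0 (· - 1))).getD r PySem.Dict.empty
            = deltaDict ((G.modify (rsD.getD tid ("", 0)).1 []
                (· ++ [(max 0 (ftD.getD tid 0 - duD.getD tid 0), ftD.getD tid 0)])).getD r []) := by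
          intro r
          rw [PySem.Dict.getD_insert, PySem.Dict.getD_modify]
          by_cases hr2 : r = (rsD.getD tid ("", 0)).1
          · rw [if_pos hr2, if_pos hr2, hv (rsD.getD tid ("", 0)).1]
            simp [deltaDict, List.foldl_append]
          · rw [if_neg hr2, if_neg hr2]
            exact hv r
        exact ih _ _ hkeys hvals
    · have hA : histBuildStepA ftD duD rsD D tid = D := by
        simp only [histBuildStepA, hg, Bool.false_eq_true, if_false]
      have hB : histGroupStepB ftD duD rsD G tid = G := by
        simp only [histGroupStepB, hg, Bool.false_eq_true, if_false]
      rw [hA, hB]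
      exact ih D G hk hv

theorem out_fold_congr (L : List String) (acc : List (String × List (Int × Int)))
    (f g : String → List (Int × Int)) (h : ∀ rid, f rid = g rid) :
    List.foldl (fun acc rid => acc ++ [(rid, f rid)]) acc L
      = List.foldl (fun acc rid => acc ++ [(rid, g rid)]) acc L := by
  simp only [h]

-- ===== VERDICT (by name: the statement is the Claim_ definition above) =====
theorem make_hist_signature_spec : Claim_equal_make_hist_signature := by
  intro finish_times durations resources tasks_in_scope _hdom
  unfold Spec_make_hist_signature make_hist_signature make_hist_signature_alt
  by_cases hsc : tasks_in_scope = []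
  · simp [hsc]
  · simp only [if_neg hsc]
    rw [pd_eq (PySem.Dict.ofList finish_times) tasks_in_scope 0]
    by_cases hpd : ((tasks_in_scope.filter
        (fun tid => (PySem.Dict.ofList finish_times).contains tid)).map
        (fun tid => (PySem.Dict.ofList finish_times).getD tid 0)).foldl max 0 ≤ 0
    · rw [if_pos hpd, if_pos hpd]
    · rw [if_neg hpd, if_neg hpd]
      obtain ⟨hk, hv⟩ := build_eq (PySem.Dict.ofList finish_times)
        (PySem.Dict.ofList durations) (PySem.Dict.ofList resources) tasks_in_scope
        PySem.Dict.empty PySem.Dict.empty rfl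
        (fun r => by rw [PySem.Dict.getD_empty, PySem.Dict.getD_empty]; rfl)
      rw [hk]
      apply out_fold_congr
      intro rid
      rw [hv rid]
      exact resource_eq _ _
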